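-- pv_equiv track=rewrite | github.com/ChosenFallen/Buzz-Controller-and-Maths-Quiz-Game | Questions/baseQuestion.py | create_id
-- ===== SOURCE A (Python) =====
-- def create_id(question: str) -> str:
--     max_length = 20
--
--     count = sum(ord(letter) for letter in question) % 10000
--     string = question.lower()
--
--     for char in [" ", "?", "!", ",", "'", '"', "\\", "%", "[", "]", "{", "}", "|"]:
--         string = string.replace(char, "")
--     invalid_chars = {
--         "*": "X",
--         "/": "D",
--         "-": "M",
--         "+": "A",
--         "^": "P",
--         "&": "N",
--         "<": "LT",
--         ">": "GT",
--         ".": "_",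
--         "=": "EQ",
--     }
--     for key, val in invalid_chars.items():
--         string = string.replace(key, val)
--     if len(string) > max_length:
--         string = string[:max_length]
--     return f"{string}-{count}"
-- ===== SOURCE B (Python) =====
-- _MAPPING = {
--     " ": "", "?": "", "!": "", ",": "", "'": "", '"': "", "\\": "",
--     "%": "", "[": "", "]": "", "{": "", "}": "", "|": "",
--     "*": "X", "/": "D", "-": "M", "+": "A", "^": "P", "&": "N",
--     "<": "LT", ">": "GT", ".": "_", "=": "EQ",
-- }
--
-- def create_id(question: str) -> str:
--     count = sum(ord(letter) for letter in question) % 10000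
--     string = "".join(_MAPPING.get(c, c) for c in question.lower())[:20]
--     return f"{string}-{count}"
-- ===== Notes on version B (the rewrite author's own statement) =====
-- stated objective: simpler
-- what changed: B replaces A's 23 sequential full-string replace passes (13 removals + 10 dict-driven substitutions, each rescanning the whole string) by a single table-driven pass: one combined char-to-replacement dict and one join over question.lower(), then truncate to 20 and append the ord-sum count.
import Mathlib
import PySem

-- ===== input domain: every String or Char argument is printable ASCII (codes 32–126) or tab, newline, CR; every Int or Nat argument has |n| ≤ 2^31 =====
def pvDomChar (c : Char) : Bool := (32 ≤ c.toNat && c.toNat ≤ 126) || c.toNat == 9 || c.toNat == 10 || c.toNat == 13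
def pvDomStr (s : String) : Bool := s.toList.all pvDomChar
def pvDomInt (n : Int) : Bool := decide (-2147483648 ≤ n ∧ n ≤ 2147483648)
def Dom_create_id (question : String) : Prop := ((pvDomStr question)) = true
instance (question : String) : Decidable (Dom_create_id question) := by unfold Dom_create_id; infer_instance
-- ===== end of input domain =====

-- B replaces A's 23 sequential full-string .replace passes by one table-driven pass
-- (a single dict lookup per character); objective: simpler/alternative single-pass rewrite.

-- ===== PORT A =====
-- the list of characters removed by A's first loop
def pvRemovalChars : List String :=
  [" ", "?", "!", ",", "'", "\"", "\\", "%", "[", "]", "{", "}", "|"]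
-- A's invalid_chars dict
def pvInvalidChars : PySem.Dict String String :=
  ((((((((((PySem.Dict.empty).insert "*" "X").insert "/" "D").insert "-" "M").insert
    "+" "A").insert "^" "P").insert "&" "N").insert "<" "LT").insert ">" "GT").insert
    "." "_").insert "=" "EQ"

def create_id (question : String) : String :=
  let max_length : Int := 20
  let count : Int :=
    PySem.Int.mod ((question.toList.map (fun letter => (letter.toNat : Int))).sum) 10000
  let string := PySem.Str.lower question
  let string := pvRemovalChars.foldl (fun s c => PySem.Str.replace s c "") string
  let string := pvInvalidChars.items.foldl (fun s kv => PySem.Str.replace s kv.1 kv.2) string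
  let string :=
    if max_length < PySem.Str.len string then PySem.Str.slice string none (some max_length)
    else string
  -- f"{string}-{count}" ported as code-point concatenation (exact)
  String.ofList (string.toList ++ '-' :: PySem.Int.toChars count)

-- ===== PORT B =====
-- Source B's _MAPPING: removal chars -> "", special chars -> their codes
def pvMapping : PySem.Dict Char String :=
  PySem.Dict.empty
    |>.insert ' ' "" |>.insert '?' "" |>.insert '!' "" |>.insert ',' "" |>.insert '\'' ""
    |>.insert '"' "" |>.insert '\\' "" |>.insert '%' "" |>.insert '[' "" |>.insert ']' ""
    |>.insert '{' "" |>.insert '}' "" |>.insert '|' ""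
    |>.insert '*' "X" |>.insert '/' "D" |>.insert '-' "M" |>.insert '+' "A" |>.insert '^' "P"
    |>.insert '&' "N" |>.insert '<' "LT" |>.insert '>' "GT" |>.insert '.' "_" |>.insert '=' "EQ"

def create_id_alt (question : String) : String :=
  let count : Int :=
    PySem.Int.mod ((question.toList.map (fun letter => (letter.toNat : Int))).sum) 10000
  -- "".join(_MAPPING.get(c, c) for c in question.lower())[:20]
  let string := PySem.List.slice
    (PySem.Chars.join [] ((PySem.Str.lower question).toList.map
      (fun c => (PySem.Dict.getD pvMapping c (String.ofList [c])).toList)))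
    none (some 20)
  -- f"{string}-{count}" ported as code-point concatenation (exact)
  String.ofList (string ++ '-' :: PySem.Int.toChars count)

-- ===== PRECONDITION & SPEC =====
def Spec_create_id (question : String) (out : String) : Prop := out = create_id_alt question
instance (question : String) (out : String) : Decidable (Spec_create_id question out) := by unfold Spec_create_id; infer_instance

-- ===== CLAIM (what is proved, stated in full; the proofs are below) =====
def Claim_equal_create_id : Prop := ∀ (question : String), Dom_create_id question → Spec_create_id question (create_id question)

-- ===== LEMMAS AND PROOFS =====

-- one single-character replacement, as a per-character function
def pySub (a : Char) (r : List Char) (c : Char) : List Char := if c = a then r else [c]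

theorem go_single (a : Char) (r : List Char) :
    ∀ (fuel : Nat) (l acc : List Char), l.length ≤ fuel →
      PySem.Chars.replace.go [a] r fuel l acc
        = acc.reverse ++ l.flatMap (pySub a r) := by
  intro fuel
  induction fuel with
  | zero =>
    intro l acc h
    cases l with
    | nil => simp [PySem.Chars.replace.go]
    | cons c t => simp at h
  | succ n ih =>
    intro l acc h
    cases l with
    | nil => simp [PySem.Chars.replace.go]
    | cons c t =>
      by_cases hc : c = a
      · subst hc
        rw [PySem.Chars.replace.go]
        simp [List.isPrefixOf, pySub, ih t _ (by simpa using Nat.le_of_succ_le_succ h)]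
      · rw [PySem.Chars.replace.go]
        simp [List.isPrefixOf, pySub, hc, Ne.symm hc,
          ih t _ (by simpa using Nat.le_of_succ_le_succ h)]

-- replacing a single-character pattern is a flatMap of pySub
theorem replace_single (s : List Char) (a : Char) (r : List Char) :
    PySem.Chars.replace s [a] r = s.flatMap (pySub a r) := by
  rw [PySem.Chars.replace]
  simp [go_single a r s.length s [] le_rfl]

-- the effect of A's whole replacement pipeline on one character
def pvApplyAll (c : Char) : List Char :=
  ((((((((((((((((((((((pySub ' ' [] c).flatMap (pySub '?' [])).flatMap (pySub '!' [])).flatMap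
    (pySub ',' [])).flatMap (pySub '\'' [])).flatMap (pySub '"' [])).flatMap
    (pySub '\\' [])).flatMap (pySub '%' [])).flatMap (pySub '[' [])).flatMap
    (pySub ']' [])).flatMap (pySub '{' [])).flatMap (pySub '}' [])).flatMap
    (pySub '|' [])).flatMap (pySub '*' ['X'])).flatMap (pySub '/' ['D'])).flatMap
    (pySub '-' ['M'])).flatMap (pySub '+' ['A'])).flatMap (pySub '^' ['P'])).flatMap
    (pySub '&' ['N'])).flatMap (pySub '<' ['L','T'])).flatMap (pySub '>' ['G','T'])).flatMap
    (pySub '.' ['_'])).flatMap (pySub '=' ['E','Q'])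

-- A's items fold, evaluated
theorem items_eval : pvInvalidChars.items =
    [("*","X"),("/","D"),("-","M"),("+","A"),("^","P"),("&","N"),
     ("<","LT"),(">","GT"),(".","_"),("=","EQ")] := by decide

-- A's replacement pipeline collapses to one flatMap of pvApplyAll
theorem pipeline_eq (s : String) :
    ((pvInvalidChars.items.foldl (fun s kv => PySem.Str.replace s kv.1 kv.2)
      (pvRemovalChars.foldl (fun s c => PySem.Str.replace s c "") s))).toList
      = s.toList.flatMap pvApplyAll := by
  rw [items_eval]
  simp only [pvRemovalChars, List.foldl_cons, List.foldl_nil]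
  simp only [PySem.Str.toList_replace]
  simp only [show (" " : String).toList = [' '] from rfl,
    show ("?" : String).toList = ['?'] from rfl,
    show ("!" : String).toList = ['!'] from rfl,
    show ("," : String).toList = [','] from rfl,
    show ("'" : String).toList = ['\''] from rfl,
    show ("\"" : String).toList = ['"'] from rfl,
    show ("\\" : String).toList = ['\\'] from rfl,
    show ("%" : String).toList = ['%'] from rfl,
    show ("[" : String).toList = ['['] from rfl,
    show ("]" : String).toList = [']'] from rfl,
    show ("{" : String).toList = ['{'] from rfl,
    show ("}" : String).toList = ['}'] from rfl,
    show ("|" : String).toList = ['|'] from rfl,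
    show ("*" : String).toList = ['*'] from rfl,
    show ("/" : String).toList = ['/'] from rfl,
    show ("-" : String).toList = ['-'] from rfl,
    show ("+" : String).toList = ['+'] from rfl,
    show ("^" : String).toList = ['^'] from rfl,
    show ("&" : String).toList = ['&'] from rfl,
    show ("<" : String).toList = ['<'] from rfl,
    show (">" : String).toList = ['>'] from rfl,
    show ("." : String).toList = ['.'] from rfl,
    show ("=" : String).toList = ['='] from rfl,
    show ("" : String).toList = [] from rfl,
    show ("X" : String).toList = ['X'] from rfl,
    show ("D" : String).toList = ['D'] from rfl,
    show ("M" : String).toList = ['M'] from rfl,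
    show ("A" : String).toList = ['A'] from rfl,
    show ("P" : String).toList = ['P'] from rfl,
    show ("N" : String).toList = ['N'] from rfl,
    show ("LT" : String).toList = ['L','T'] from rfl,
    show ("GT" : String).toList = ['G','T'] from rfl,
    show ("_" : String).toList = ['_'] from rfl,
    show ("EQ" : String).toList = ['E','Q'] from rfl]
  simp only [replace_single, List.flatMap_assoc]
  refine congrFun (congrArg _ ?_) _
  funext c
  simp only [pvApplyAll, List.flatMap_assoc]

-- per-character agreement of the two pipelines
theorem pointwise (c : Char) :
    pvApplyAll c = (PySem.Dict.getD pvMapping c (String.ofList [c])).toList := by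
  by_cases h1 : c = ' '; · subst h1; decide
  by_cases h2 : c = '?'; · subst h2; decide
  by_cases h3 : c = '!'; · subst h3; decide
  by_cases h4 : c = ','; · subst h4; decide
  by_cases h5 : c = '\''; · subst h5; decide
  by_cases h6 : c = '"'; · subst h6; decide
  by_cases h7 : c = '\\'; · subst h7; decide
  by_cases h8 : c = '%'; · subst h8; decide
  by_cases h9 : c = '['; · subst h9; decide
  by_cases h10 : c = ']'; · subst h10; decide
  by_cases h11 : c = '{'; · subst h11; decide
  by_cases h12 : c = '}'; · subst h12; decide
  by_cases h13 : c = '|'; · subst h13; decide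
  by_cases h14 : c = '*'; · subst h14; decide
  by_cases h15 : c = '/'; · subst h15; decide
  by_cases h16 : c = '-'; · subst h16; decide
  by_cases h17 : c = '+'; · subst h17; decide
  by_cases h18 : c = '^'; · subst h18; decide
  by_cases h19 : c = '&'; · subst h19; decide
  by_cases h20 : c = '<'; · subst h20; decide
  by_cases h21 : c = '>'; · subst h21; decide
  by_cases h22 : c = '.'; · subst h22; decide
  by_cases h23 : c = '='; · subst h23; decide
  · have hd : PySem.Dict.getD pvMapping c (String.ofList [c]) = String.ofList [c] := by
      simp [pvMapping, PySem.Dict.getD_insert, h1, h2, h3, h4, h5, h6, h7, h8, h9, h10,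
        h11, h12, h13, h14, h15, h16, h17, h18, h19, h20, h21, h22, h23,
        show ∀ d, (PySem.Dict.empty : PySem.Dict Char String).getD c d = d from fun _ => rfl]
    rw [hd]
    simp [pvApplyAll, pySub, h1, h2, h3, h4, h5, h6, h7, h8, h9, h10, h11, h12, h13,
      h14, h15, h16, h17, h18, h19, h20, h21, h22, h23]

-- "".join over [] is flatten
theorem join_flatten (l : List (List Char)) : PySem.Chars.join [] l = l.flatten := by
  show List.intercalate [] l = l.flatten
  induction l with
  | nil => rfl
  | cons x t ih =>
    cases t with
    | nil => simp [List.intercalate]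
    | cons y u => simp_all [List.intercalate, List.intersperse]

-- A's conditional truncation is an unconditional take 20
theorem trunc_eq (s : String) :
    (if (20 : Int) < PySem.Str.len s then PySem.Str.slice s none (some 20) else s).toList
      = s.toList.take 20 := by
  by_cases h : (20 : Int) < PySem.Str.len s
  · rw [if_pos h, PySem.Str.toList_slice]
    simp [PySem.Chars.slice_eq_listSlice, PySem.List.slice_to s.toList (by norm_num : (0:Int) ≤ 20)]
  · rw [if_neg h]
    have : s.toList.length ≤ 20 := by
      have := PySem.Str.len_eq s
      omega
    exact (List.take_of_length_le this).symm

-- ===== VERDICT (by name: the statement is the Claim_ definition above) =====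
theorem create_id_spec : Claim_equal_create_id := by
  intro question _
  show create_id question = create_id_alt question
  unfold create_id create_id_alt
  apply congrArg String.ofList
  rw [trunc_eq, pipeline_eq, PySem.Str.toList_lower,
    PySem.List.slice_to _ (by norm_num : (0:Int) ≤ 20), join_flatten,
    ← List.flatMap_def, funext pointwise]
  rfl
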